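-- pv_equiv track=rewrite | github.com/juangrukat/CutScript | backend/services/audio_analyzer.py | _classify_coda
-- ===== SOURCE A (Python) =====
-- _FRICATIVE_LETTERS = {"s", "f", "v", "z", "h"}
--
-- _STOP_LETTERS = {"p", "b", "t", "d", "k", "g"}
--
-- _NASAL_LETTERS = {"m", "n"}
--
-- _APPROX_LETTERS = {"w", "y", "l", "r"}
--
-- _FRICATIVE_DIGRAPHS = {"sh", "ch", "th", "ph", "gh", "zh"}
--
-- def _classify_coda(text: str) -> str:
--     """Phoneme-class of the last phone of a word, from spelling."""
--     t = "".join(c for c in text.lower() if c.isalpha())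
--     if not t:
--         return "vowel"
--     if t[-2:] in _FRICATIVE_DIGRAPHS:
--         return "fricative"
--     if t.endswith("ng"):
--         return "nasal"
--     c = t[-1]
--     if c in _FRICATIVE_LETTERS:
--         return "fricative"
--     if c in _STOP_LETTERS:
--         return "stop"
--     if c in _NASAL_LETTERS:
--         return "nasal"
--     if c in _APPROX_LETTERS:
--         return "approximant"
--     return "vowel"
-- ===== SOURCE B (Python) =====
-- _FRICATIVE_LETTERS = {"s", "f", "v", "z", "h"}
--
-- _STOP_LETTERS = {"p", "b", "t", "d", "k", "g"}
--
-- _NASAL_LETTERS = {"m", "n"}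
--
-- _APPROX_LETTERS = {"w", "y", "l", "r"}
--
-- _FRICATIVE_DIGRAPHS = {"sh", "ch", "th", "ph", "gh", "zh"}
--
--
-- def _letter_class(c: str) -> str:
--     if c in _FRICATIVE_LETTERS:
--         return "fricative"
--     if c in _STOP_LETTERS:
--         return "stop"
--     if c in _NASAL_LETTERS:
--         return "nasal"
--     if c in _APPROX_LETTERS:
--         return "approximant"
--     return "vowel"
--
--
-- def _classify_coda(text: str) -> str:
--     # Scan from the end; stop as soon as the last two alphabetic chars are known.
--     last = None
--     prev = None
--     for c in reversed(text):
--         if c.isalpha():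
--             if last is None:
--                 last = c.lower()
--             else:
--                 prev = c.lower()
--                 break
--     if last is None:
--         return "vowel"
--     if prev is not None:
--         duo = prev + last
--         if duo in _FRICATIVE_DIGRAPHS:
--             return "fricative"
--         if duo == "ng":
--             return "nasal"
--     return _letter_class(last)
-- ===== Notes on version B (the rewrite author's own statement) =====
-- stated objective: faster
-- what changed: B replaces A's full lowercase-and-filter pass that builds the whole alpha-only string by a single reverse scan that stops as soon as the last two alphabetic characters are found, then classifies directly from that (prev,last) pair.
import Mathlib
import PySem

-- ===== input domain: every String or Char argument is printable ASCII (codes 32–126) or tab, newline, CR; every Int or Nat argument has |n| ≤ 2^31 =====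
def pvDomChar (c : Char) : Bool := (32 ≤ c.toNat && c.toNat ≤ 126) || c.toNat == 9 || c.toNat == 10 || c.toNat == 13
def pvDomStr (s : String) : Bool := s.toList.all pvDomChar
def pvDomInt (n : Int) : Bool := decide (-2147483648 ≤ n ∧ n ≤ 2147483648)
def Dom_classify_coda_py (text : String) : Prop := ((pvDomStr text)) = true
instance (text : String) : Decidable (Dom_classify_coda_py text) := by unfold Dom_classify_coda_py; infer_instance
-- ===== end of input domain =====

-- B replaces A's full lowercase+filter pass by a reverse scan that stops after the last
-- two alphabetic characters and classifies from them directly (objective: alternative).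

-- shared module-level constants (the Python sets)
def pvFricLetters : List Char := ['s', 'f', 'v', 'z', 'h']
def pvStopLetters : List Char := ['p', 'b', 't', 'd', 'k', 'g']
def pvNasalLetters : List Char := ['m', 'n']
def pvApproxLetters : List Char := ['w', 'y', 'l', 'r']
def pvFricDigraphs : List (List Char) := [['s','h'], ['c','h'], ['t','h'], ['p','h'], ['g','h'], ['z','h']]

-- ===== PORT A =====
def classify_coda_py (text : String) : String :=
  let t : List Char := (PySem.Chars.lower text.toList).filter PySem.Chars.isalpha
  if t = [] then "vowel"
  else if (PySem.List.slice t (some (-2)) none) ∈ pvFricDigraphs then "fricative"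
  else if PySem.Chars.endswith t ['n', 'g'] then "nasal"
  else
    match PySem.List.pyGet? t (-1) with
    | none => "vowel"  -- unreachable: t ≠ [] here (Python would raise only on empty t)
    | some c =>
      if c ∈ pvFricLetters then "fricative"
      else if c ∈ pvStopLetters then "stop"
      else if c ∈ pvNasalLetters then "nasal"
      else if c ∈ pvApproxLetters then "approximant"
      else "vowel"

-- ===== PORT B =====
-- helper _letter_class of Source B
def pvLetterClass (c : Char) : String :=
  if c ∈ pvFricLetters then "fricative"
  else if c ∈ pvStopLetters then "stop"
  else if c ∈ pvNasalLetters then "nasal"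
  else if c ∈ pvApproxLetters then "approximant"
  else "vowel"

-- the reverse scan of Source B: walk the reversed character list, collect the lowercased
-- final alpha char (last) and the one before it (prev), stopping as soon as both exist
def pvScanB : List Char → Option Char → Option Char × Option Char
  | [], last => (last, none)
  | c :: rest, last =>
    if PySem.Chars.isalpha c then
      match last with
      | none => pvScanB rest (some (PySem.Chars.lowerChar c))
      | some l => (some l, some (PySem.Chars.lowerChar c))
    else pvScanB rest last

def classify_coda_py_alt (text : String) : String :=
  match pvScanB text.toList.reverse none with
  | (none, _) => "vowel"
  | (some l, prev?) =>
    match prev? with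
    | some p =>
      if [p, l] ∈ pvFricDigraphs then "fricative"
      else if [p, l] = ['n', 'g'] then "nasal"
      else pvLetterClass l
    | none => pvLetterClass l

-- ===== PRECONDITION & SPEC =====
def Spec_classify_coda_py (text : String) (out : String) : Prop := out = classify_coda_py_alt text
instance (text : String) (out : String) : Decidable (Spec_classify_coda_py text out) := by unfold Spec_classify_coda_py; infer_instance

-- ===== CLAIM (what is proved, stated in full; the proofs are below) =====
def Claim_equal_classify_coda_py : Prop := ∀ (text : String), Dom_classify_coda_py text → Spec_classify_coda_py text (classify_coda_py text)

-- ===== LEMMAS AND PROOFS =====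

theorem pv_isalpha_lower (c : Char) :
    PySem.Chars.isalpha (PySem.Chars.lowerChar c) = PySem.Chars.isalpha c := by
  simp only [PySem.Chars.isalpha, PySem.Chars.lowerChar, PySem.Chars.isupper, PySem.Chars.islower]
  split_ifs with h
  · simp only [Bool.and_eq_true, decide_eq_true_eq, Char.le_def, UInt32.le_iff_toNat_le] at h ⊢
    have hc : c.toNat = c.val.toNat := rfl
    have hA : 'A'.val.toNat = 65 := rfl
    have hZ : 'Z'.val.toNat = 90 := rfl
    have ha : 'a'.val.toNat = 97 := rfl
    have hz : 'z'.val.toNat = 122 := rfl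
    have hv : (Char.ofNat (c.toNat + 32)).toNat = c.toNat + 32 := by
      rw [Char.toNat_ofNat, if_pos]
      left; omega
    have hv' : (Char.ofNat (c.toNat + 32)).val.toNat = c.toNat + 32 := hv
    rw [Bool.eq_iff_iff]
    simp only [Bool.or_eq_true, Bool.and_eq_true, decide_eq_true_eq, hA, hZ, ha, hz, hc] at *
    omega
  · rfl

-- A's filtered-lowered string equals lowering the alpha chars of the original
theorem pv_filter_lower (xs : List Char) :
    (PySem.Chars.lower xs).filter PySem.Chars.isalpha
      = (xs.filter PySem.Chars.isalpha).map PySem.Chars.lowerChar := by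
  simp only [PySem.Chars.lower, List.filter_map]
  exact congrArg _ (List.filter_congr (fun c _ => pv_isalpha_lower c))

-- the scan with `last` already found returns it plus the next filtered-lowered char
theorem pvScanB_some (l : List Char) (a : Char) :
    pvScanB l (some a) = (some a, ((l.filter PySem.Chars.isalpha).map PySem.Chars.lowerChar).head?) := by
  induction l with
  | nil => rfl
  | cons c rest ih =>
    by_cases h : PySem.Chars.isalpha c
    · simp [pvScanB, h]
    · simp [pvScanB, h, ih]

-- the full scan returns the first two elements of the filtered-lowered list
theorem pvScanB_none (l : List Char) :
    pvScanB l none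
      = (((l.filter PySem.Chars.isalpha).map PySem.Chars.lowerChar).head?,
         ((l.filter PySem.Chars.isalpha).map PySem.Chars.lowerChar).tail.head?) := by
  induction l with
  | nil => rfl
  | cons c rest ih =>
    by_cases h : PySem.Chars.isalpha c
    · simp [pvScanB, h, pvScanB_some]
    · simp [pvScanB, h, ih]

-- a two-char suffix test against a list ending in [p, l]
theorem pv_suffix_two (A : List Char) (p l : Char) :
    (['n', 'g'] <:+ (A ++ [p, l])) ↔ (p = 'n' ∧ l = 'g') := by
  constructor
  · rintro ⟨u, hu⟩
    have h1 : (u ++ ['n', 'g']).getLast? = (A ++ [p, l]).getLast? := by rw [hu]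
    have h2 : (u ++ ['n', 'g']).dropLast = (A ++ [p, l]).dropLast := by rw [hu]
    have e1 : (u ++ ['n', 'g']).getLast? = some 'g' := by
      rw [show u ++ ['n', 'g'] = (u ++ ['n']) ++ ['g'] by simp, List.getLast?_concat]
    have e2 : (A ++ [p, l]).getLast? = some l := by
      rw [show A ++ [p, l] = (A ++ [p]) ++ [l] by simp, List.getLast?_concat]
    have hl : l = 'g' := by rw [e1, e2] at h1; exact (Option.some.inj h1).symm
    have d1 : (u ++ ['n', 'g']).dropLast = u ++ ['n'] := by
      rw [show u ++ ['n', 'g'] = (u ++ ['n']) ++ ['g'] by simp, List.dropLast_concat]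
    have d2 : (A ++ [p, l]).dropLast = A ++ [p] := by
      rw [show A ++ [p, l] = (A ++ [p]) ++ [l] by simp, List.dropLast_concat]
    have h3 : (u ++ ['n']).getLast? = (A ++ [p]).getLast? := by rw [← d1, ← d2, h2]
    rw [List.getLast?_concat, List.getLast?_concat] at h3
    exact ⟨(Option.some.inj h3).symm, hl⟩
  · rintro ⟨hp, hl⟩
    subst hp; subst hl
    exact List.suffix_append A ['n', 'g']

-- a single char is never one of the two-letter digraphs
theorem pv_single_not_digraph (l : Char) : [l] ∉ pvFricDigraphs := by
  simp [pvFricDigraphs]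

theorem classify_coda_eq (text : String) :
    classify_coda_py text = classify_coda_py_alt text := by
  unfold classify_coda_py classify_coda_py_alt
  rw [pv_filter_lower]
  set t : List Char := (text.toList.filter PySem.Chars.isalpha).map PySem.Chars.lowerChar with ht
  have hscan : pvScanB text.toList.reverse none = (t.reverse.head?, t.reverse.tail.head?) := by
    rw [pvScanB_none, List.filter_reverse, List.map_reverse, ← ht]
  rw [hscan]
  rcases hr : t.reverse with _ | ⟨l, rest⟩
  · -- t = []
    have h0 : t = [] := by
      have := congrArg List.reverse hr; simpa using this
    simp [h0]
  · have htv : t = rest.reverse ++ [l] := by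
      have := congrArg List.reverse hr; simpa using this
    rcases rest with _ | ⟨p, rest2⟩
    · -- t = [l]
      simp only [htv, List.reverse_nil, List.nil_append]
      have hslice : PySem.List.slice [l] (some (-2)) none = [l] := by
        rw [PySem.List.slice_from_neg_ofNat [l] 2 (by omega)]
        simp
      have hend : PySem.Chars.endswith [l] ['n', 'g'] = false := by
        rw [Bool.eq_false_iff]
        intro hcon
        have := List.isSuffixOf_iff_suffix.mp hcon
        have := this.length_le
        simp at this
      simp [hslice, hend, pv_single_not_digraph l, PySem.List.pyGet?_neg_one, pvLetterClass]
    · -- t = rest2.reverse ++ [p, l]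
      have htv2 : t = rest2.reverse ++ [p, l] := by
        simpa using htv
      have hne : t ≠ [] := by simp [htv2]
      have hlen : t.length = rest2.reverse.length + 2 := by simp [htv2]
      have hslice : PySem.List.slice t (some (-2)) none = [p, l] := by
        rw [PySem.List.slice_from_neg_ofNat t 2 (by omega), hlen, Nat.add_sub_cancel, htv2,
          List.drop_left]
      have hend : PySem.Chars.endswith t ['n', 'g'] = (decide (p = 'n' ∧ l = 'g')) := by
        rw [Bool.eq_iff_iff]
        show _root_.List.isSuffixOf _ _ = true ↔ _
        rw [List.isSuffixOf_iff_suffix, htv2, pv_suffix_two]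
        simp
      have hlast : PySem.List.pyGet? t (-1) = some l := by
        rw [PySem.List.pyGet?_neg_one, htv2,
          show rest2.reverse ++ [p, l] = (rest2.reverse ++ [p]) ++ [l] by simp,
          List.getLast?_concat]
      rw [if_neg hne, hslice, hend, hlast]
      by_cases hd : [p, l] ∈ pvFricDigraphs
      · simp [hd]
      · by_cases hng : p = 'n' ∧ l = 'g'
        · simp [hng]
        · simp [hd, hng, pvLetterClass]

-- ===== VERDICT (by name: the statement is the Claim_ definition above) =====
theorem classify_coda_py_spec : Claim_equal_classify_coda_py := by
  intro text _
  unfold Spec_classify_coda_py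
  exact classify_coda_eq text
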